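-- pv_equiv track=rewrite | github.com/alexTormentor/MaNA | APIs/API variants/FastAPI_Book/book_management.py | filter_books
-- ===== SOURCE A (Python) =====
-- from typing import List, Dict
--
-- def filter_books(books: List[Dict], author: str = None, genre: str = None, setting: str = None) -> List[Dict]:
--     """Фильтрация книг по тегам."""
--     filtered_books = books
--     if author:
--         filtered_books = [book for book in filtered_books if book["author"] == author]
--     if genre:
--         filtered_books = [book for book in filtered_books if book["genre"] == genre]
--     if setting:
--         filtered_books = [book for book in filtered_books if book["setting"] == setting]
--     return filtered_books
-- ===== SOURCE B (Python) =====
-- def filter_books(books, author=None, genre=None, setting=None):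
--     """Data-driven: build the active (key, value) query spec once, then one
--     generic pass keeping the books matching every pair of the spec."""
--     spec = [(k, v) for k, v in (("author", author), ("genre", genre), ("setting", setting)) if v]
--     return [book for book in books if all(book[k] == v for k, v in spec)]
-- ===== Notes on version B (the rewrite author's own statement) =====
-- stated objective: simpler
-- what changed: Replaces three hard-coded sequential comprehension passes by a data-driven query: the truthy tags are collected once into a (key, value) spec list and a single generic pass keeps the books matching every pair of the spec.
import Mathlib
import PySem

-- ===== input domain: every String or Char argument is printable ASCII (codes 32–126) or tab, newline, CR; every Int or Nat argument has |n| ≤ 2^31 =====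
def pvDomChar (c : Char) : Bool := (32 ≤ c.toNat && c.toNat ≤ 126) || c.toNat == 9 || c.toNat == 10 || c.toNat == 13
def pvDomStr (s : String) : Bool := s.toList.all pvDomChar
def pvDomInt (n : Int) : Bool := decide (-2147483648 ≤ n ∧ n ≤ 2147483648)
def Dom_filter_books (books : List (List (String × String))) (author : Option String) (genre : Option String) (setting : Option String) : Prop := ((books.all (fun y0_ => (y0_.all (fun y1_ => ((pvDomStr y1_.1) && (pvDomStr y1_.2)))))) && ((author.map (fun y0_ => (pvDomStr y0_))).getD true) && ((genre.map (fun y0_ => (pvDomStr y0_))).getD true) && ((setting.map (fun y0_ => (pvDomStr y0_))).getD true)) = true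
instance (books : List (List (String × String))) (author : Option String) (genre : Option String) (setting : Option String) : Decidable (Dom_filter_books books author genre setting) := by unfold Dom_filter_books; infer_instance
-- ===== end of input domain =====

-- B replaces A's three hard-coded sequential passes by a data-driven query spec built once
-- and one generic all-pairs-match pass (objective: simpler).

-- Python `if tag:` truthiness for an Optional[str]
def pvTruthy (tag : Option String) : Bool :=
  match tag with
  | none => false
  | some s => s ≠ ""

-- dict lookup, first match; value with default "" — exact under Pre_ (the key is present there, so the default is never used)
def pvLookup (b : List (String × String)) (k : String) : String :=
  ((b.find? (fun p => p.1 == k)).map (·.2)).getD ""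

-- ===== PORT A =====
-- A: three sequential list-comprehension passes, each guarded by the tag's truthiness
def filter_books (books : List (List (String × String))) (author : Option String) (genre : Option String) (setting : Option String) : List (List (String × String)) :=
  let fb0 := books
  let fb1 := if pvTruthy author then fb0.filter (fun b => pvLookup b "author" == author.getD "") else fb0
  let fb2 := if pvTruthy genre then fb1.filter (fun b => pvLookup b "genre" == genre.getD "") else fb1
  let fb3 := if pvTruthy setting then fb2.filter (fun b => pvLookup b "setting" == setting.getD "") else fb2
  fb3

-- ===== PORT B =====
-- the query spec: the (key, value) pairs whose tag is truthy
def pvSpec (author genre setting : Option String) : List (String × String) :=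
  (([("author", author), ("genre", genre), ("setting", setting)] : List (String × Option String)).filter
    (fun p => pvTruthy p.2)).map (fun p => (p.1, p.2.getD ""))

-- B: one generic pass keeping the books matching every pair of the spec
def filter_books_alt (books : List (List (String × String))) (author : Option String) (genre : Option String) (setting : Option String) : List (List (String × String)) :=
  let spec := pvSpec author genre setting
  books.filter (fun book => spec.all (fun kv => pvLookup book kv.1 == kv.2))

-- ===== PRECONDITION & SPEC =====
-- Pre_ excludes exactly the inputs where Python A raises KeyError: a book is inspected for a truthy tag's key only if
-- it survived the earlier truthy-tag passes, and every inspected book must carry the key.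
def Pre_filter_books (books : List (List (String × String))) (author : Option String) (genre : Option String) (setting : Option String) : Prop :=
  ∀ b ∈ books,
    (pvTruthy author = true → (b.find? (fun p => p.1 == "author")).isSome) ∧
    ((pvTruthy author = true → pvLookup b "author" = author.getD "") →
      pvTruthy genre = true → (b.find? (fun p => p.1 == "genre")).isSome) ∧
    ((pvTruthy author = true → pvLookup b "author" = author.getD "") →
      (pvTruthy genre = true → pvLookup b "genre" = genre.getD "") →
      pvTruthy setting = true → (b.find? (fun p => p.1 == "setting")).isSome)
instance (books : List (List (String × String))) (author : Option String) (genre : Option String) (setting : Option String) : Decidable (Pre_filter_books books author genre setting) := by unfold Pre_filter_books; infer_instance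

def pvWitness_filter_books : (List (List (String × String))) × Option String × Option String × Option String :=
  ([[("author", "x"), ("genre", "g")], [("author", "y"), ("genre", "g")]], some "x", some "g", none)

def Spec_filter_books (books : List (List (String × String))) (author : Option String) (genre : Option String) (setting : Option String) (out : List (List (String × String))) : Prop := out = filter_books_alt books author genre setting
instance (books : List (List (String × String))) (author : Option String) (genre : Option String) (setting : Option String) (out : List (List (String × String))) : Decidable (Spec_filter_books books author genre setting out) := by unfold Spec_filter_books; infer_instance

-- ===== CLAIM (what is proved, stated in full; the proofs are below) =====
def Claim_equal_filter_books : Prop := ∀ (books : List (List (String × String))) (author : Option String) (genre : Option String) (setting : Option String), Dom_filter_books books author genre setting → Pre_filter_books books author genre setting → Spec_filter_books books author genre setting (filter_books books author genre setting)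

-- ===== LEMMAS AND PROOFS =====

-- ===== VERDICT (by name: the statement is the Claim_ definition above) =====
theorem filter_books_spec : Claim_equal_filter_books := by
  intro books author genre setting _ _
  unfold Spec_filter_books filter_books filter_books_alt
  cases ha : pvTruthy author <;> cases hg : pvTruthy genre <;> cases hs : pvTruthy setting <;>
    simp only [ha, hg, hs, if_true, if_false, pvSpec, List.filter_cons, List.filter_nil,
      List.map_cons, List.map_nil, List.all_cons, List.all_nil, List.filter_filter,
      Bool.false_eq_true] <;>
    first
    | (symm; rw [List.filter_eq_self]; intro b _; simp)
    | (apply List.filter_congr; intro b _; simp [Bool.and_assoc, Bool.and_comm, Bool.and_left_comm])
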